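-- pv_equiv track=rewrite | github.com/Mayank3603/Topics-in-Cryptanalysis | A1/aes_implementation.py | mix_column_values
-- ===== SOURCE A (Python) =====
-- def multiply_by_two(a):
--     if (a & 0x80):
--         result = ((a << 1) ^ 0x1B) & 0xFF
--     else:
--         result = (a << 1)
--     return result
--
-- def transpose_matrix(matrix):
--     return [[matrix[j][i] for j in range(len(matrix))] for i in range(len(matrix[0]))]
--
-- def mix_column_values(state):
--
--     state = transpose_matrix(state)
--     new_state = []
--
--     for column in state:
--
--         t = column[0] ^ column[1] ^ column[2] ^ column[3]
--         new_column = [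
--             column[0] ^ t ^ multiply_by_two(column[0] ^ column[1]),
--             column[1] ^ t ^ multiply_by_two(column[1] ^ column[2]),
--             column[2] ^ t ^ multiply_by_two(column[2] ^ column[3]),
--             column[3] ^ t ^ multiply_by_two(column[3] ^ column[0]),
--         ]
--         new_state.append(new_column)
--
--     return new_state
-- ===== SOURCE B (Python) =====
-- def multiply_by_two(a):
--     if (a & 0x80):
--         result = ((a << 1) ^ 0x1B) & 0xFF
--     else:
--         result = (a << 1)
--     return result
--
-- def rotate(v, n):
--     return v[n:] + v[:n]
--
-- def xor_vec(u, v):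
--     return [x ^ y for x, y in zip(u, v)]
--
-- def mix_column_values(state):
--     r0, r1, r2, r3 = state[0], state[1], state[2], state[3]
--     result = []
--     for c in zip(r0, r1, r2, r3):
--         c = list(c)
--         acc = [multiply_by_two(x) for x in xor_vec(c, rotate(c, 1))]
--         for n in (1, 2, 3):
--             acc = xor_vec(acc, rotate(c, n))
--         result.append(acc)
--     return result
-- ===== Notes on version B (the rewrite author's own statement) =====
-- stated objective: alternative
-- what changed: B drops the transpose helper and the t-accumulator entirely: it unpacks the four state rows, forms each column with zip, and computes each output column by whole-vector staged passes -- map multiply_by_two over (c xor rotate(c,1)), then xor in the rotations of c by 1, 2 and 3 -- instead of A's transpose_matrix (which walks every row) followed by a per-entry scalar formula with the precomputed column sum t; zip/slice-based column access avoids A's per-element nested indexing.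
-- outside the precondition, e.g. on mix_column_values([[]]): A returns [], B raises IndexError; on mix_column_values([[], [], []]): A returns [], B raises IndexError
import Mathlib
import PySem

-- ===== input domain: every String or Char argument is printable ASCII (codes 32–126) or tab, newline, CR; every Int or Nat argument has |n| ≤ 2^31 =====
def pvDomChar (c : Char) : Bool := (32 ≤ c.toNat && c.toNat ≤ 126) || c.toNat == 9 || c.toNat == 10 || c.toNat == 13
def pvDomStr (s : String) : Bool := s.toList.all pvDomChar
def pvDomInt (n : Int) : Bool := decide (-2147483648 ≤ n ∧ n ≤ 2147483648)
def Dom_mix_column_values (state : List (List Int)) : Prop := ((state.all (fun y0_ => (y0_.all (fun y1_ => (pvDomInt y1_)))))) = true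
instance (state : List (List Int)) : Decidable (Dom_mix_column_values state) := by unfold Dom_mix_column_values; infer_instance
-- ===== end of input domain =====

-- B drops transpose_matrix and the t-accumulator: it unpacks the four state rows, forms each
-- column by zipping them, and builds each output column by whole-vector staged passes
-- (map multiply_by_two over c xor rotate(c,1), then xor in rotate(c,1..3)) — alternative decomposition.


-- ===== PORT A =====
-- multiply_by_two (shared module helper, used verbatim by both A and B)
def pvMulTwo (a : Int) : Int :=
  if PySem.Int.band a 0x80 ≠ 0 then
    PySem.Int.band (PySem.Int.bxor (a <<< (1 : Nat)) 0x1B) 0xFF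
  else
    a <<< (1 : Nat)

-- transpose_matrix
def pvTranspose (matrix : List (List Int)) : List (List Int) :=
  (PySem.List.pyRange 0 ((PySem.List.pyGetD matrix 0 []).length : Int) 1).map (fun i =>
    (PySem.List.pyRange 0 (matrix.length : Int) 1).map (fun j =>
      PySem.List.pyGetD (PySem.List.pyGetD matrix j []) i 0))

def mix_column_values (state : List (List Int)) : List (List Int) :=
  let st := pvTranspose state
  st.foldl (fun new_state column =>
    let t := PySem.Int.bxor (PySem.Int.bxor (PySem.Int.bxor
      (PySem.List.pyGetD column 0 0) (PySem.List.pyGetD column 1 0))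
      (PySem.List.pyGetD column 2 0)) (PySem.List.pyGetD column 3 0)
    new_state ++ [[
      PySem.Int.bxor (PySem.Int.bxor (PySem.List.pyGetD column 0 0) t)
        (pvMulTwo (PySem.Int.bxor (PySem.List.pyGetD column 0 0) (PySem.List.pyGetD column 1 0))),
      PySem.Int.bxor (PySem.Int.bxor (PySem.List.pyGetD column 1 0) t)
        (pvMulTwo (PySem.Int.bxor (PySem.List.pyGetD column 1 0) (PySem.List.pyGetD column 2 0))),
      PySem.Int.bxor (PySem.Int.bxor (PySem.List.pyGetD column 2 0) t)
        (pvMulTwo (PySem.Int.bxor (PySem.List.pyGetD column 2 0) (PySem.List.pyGetD column 3 0))),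
      PySem.Int.bxor (PySem.Int.bxor (PySem.List.pyGetD column 3 0) t)
        (pvMulTwo (PySem.Int.bxor (PySem.List.pyGetD column 3 0) (PySem.List.pyGetD column 0 0)))]]) []

-- ===== PORT B =====
-- rotate(v, n) = v[n:] + v[:n]
def pvRotate (v : List Int) (n : Int) : List Int :=
  PySem.List.slice v (some n) none ++ PySem.List.slice v none (some n)

-- xor_vec(u, v) = [x ^ y for x, y in zip(u, v)]
def pvXorVec (u v : List Int) : List Int := List.zipWith PySem.Int.bxor u v

-- zip(r0, r1, r2, r3)
def pvZip4 (a b c d : List Int) : List (Int × Int × Int × Int) :=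
  match a, b, c, d with
  | x :: a, y :: b, z :: c, w :: d => (x, y, z, w) :: pvZip4 a b c d
  | _, _, _, _ => []

def mix_column_values_alt (state : List (List Int)) : List (List Int) :=
  let r0 := PySem.List.pyGetD state 0 []
  let r1 := PySem.List.pyGetD state 1 []
  let r2 := PySem.List.pyGetD state 2 []
  let r3 := PySem.List.pyGetD state 3 []
  (pvZip4 r0 r1 r2 r3).foldl (fun result tup =>
    let c := [tup.1, tup.2.1, tup.2.2.1, tup.2.2.2]
    let acc := (pvXorVec c (pvRotate c 1)).map pvMulTwo
    let acc := ([1, 2, 3] : List Int).foldl (fun acc n => pvXorVec acc (pvRotate c n)) acc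
    result ++ [acc]) []

-- ===== PRECONDITION & SPEC =====
-- Pre_ excludes the inputs where Python A raises IndexError (empty state, a row shorter than the
-- first row, fewer than 4 rows with nonempty first row) and the degenerate zero-width states with
-- fewer than 4 rows, where A's empty answer is an accident of its column loop never running while
-- B genuinely needs the four state rows and raises.
def Pre_mix_column_values (state : List (List Int)) : Prop :=
  4 ≤ state.length ∧ ∀ row ∈ state, (state.headD []).length ≤ row.length
instance (state : List (List Int)) : Decidable (Pre_mix_column_values state) := by
  unfold Pre_mix_column_values; infer_instance

def pvWitness_mix_column_values : List (List Int) :=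
  [[1, 2, 3, 4], [5, 6, 7, 8], [9, 10, 11, 12], [13, 14, 15, 16]]

def Spec_mix_column_values (state : List (List Int)) (out : List (List Int)) : Prop := out = mix_column_values_alt state
instance (state : List (List Int)) (out : List (List Int)) : Decidable (Spec_mix_column_values state out) := by unfold Spec_mix_column_values; infer_instance

-- ===== CLAIM (what is proved, stated in full; the proofs are below) =====
def Claim_equal_mix_column_values : Prop := ∀ (state : List (List Int)), Dom_mix_column_values state → Pre_mix_column_values state → Spec_mix_column_values state (mix_column_values state)

-- ===== LEMMAS AND PROOFS =====

-- representation lemmas for bxor on negatives (two's complement)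
theorem pv_bx_pn (m n : Nat) : PySem.Int.bxor (↑m) (-↑n - 1) = -↑(m ^^^ n) - 1 := by
  simp [PySem.Int.bxor]; intro h; exact absurd h (by omega)

theorem pv_bx_np (m n : Nat) : PySem.Int.bxor (-↑m - 1) (↑n) = -↑(m ^^^ n) - 1 := by
  simp [PySem.Int.bxor]; intro h; exact absurd h (by omega)

theorem pv_bx_nn (m n : Nat) : PySem.Int.bxor (-↑m - 1) (-↑n - 1) = ↑(m ^^^ n) := by
  simp [PySem.Int.bxor]; split_ifs <;> omega

theorem pv_int_cases (a : Int) : (∃ m : Nat, a = ↑m) ∨ (∃ m : Nat, a = -↑m - 1) := by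
  cases a with
  | ofNat m => exact Or.inl ⟨m, rfl⟩
  | negSucc m => exact Or.inr ⟨m, by simp [Int.negSucc_eq]; ring⟩

theorem pv_bxor_assoc (a b c : Int) :
    PySem.Int.bxor (PySem.Int.bxor a b) c = PySem.Int.bxor a (PySem.Int.bxor b c) := by
  rcases pv_int_cases a with ⟨m, rfl⟩ | ⟨m, rfl⟩ <;>
  rcases pv_int_cases b with ⟨n, rfl⟩ | ⟨n, rfl⟩ <;>
  rcases pv_int_cases c with ⟨k, rfl⟩ | ⟨k, rfl⟩ <;>
  simp [pv_bx_pn, pv_bx_np, pv_bx_nn, Nat.xor_assoc]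

theorem pv_bxor_cancel (a b : Int) : PySem.Int.bxor a (PySem.Int.bxor a b) = b := by
  rw [← pv_bxor_assoc, PySem.Int.bxor_self, PySem.Int.bxor_comm]
  exact PySem.Int.bxor_zero b

theorem pv_bxor_left_comm (a b c : Int) :
    PySem.Int.bxor a (PySem.Int.bxor b c) = PySem.Int.bxor b (PySem.Int.bxor a c) := by
  rw [← pv_bxor_assoc, PySem.Int.bxor_comm a b, pv_bxor_assoc]

-- zip of four lists as an indexed map, when the first list is shortest
theorem pvZip4_eq (a b c d : List Int) (hb : a.length ≤ b.length) (hc : a.length ≤ c.length)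
    (hd : a.length ≤ d.length) :
    pvZip4 a b c d = (List.range a.length).map
      (fun i => (a.getD i 0, b.getD i 0, c.getD i 0, d.getD i 0)) := by
  induction a generalizing b c d with
  | nil => simp [pvZip4]
  | cons x a ih =>
    cases b with
    | nil => simp at hb
    | cons y b =>
      cases c with
      | nil => simp at hc
      | cons z c =>
        cases d with
        | nil => simp at hd
        | cons w d =>
          simp only [List.length_cons, List.range_succ_eq_map, List.map_cons, List.map_map]
          simp only [pvZip4, List.getD_cons_zero]
          refine congrArg _ ?_
          rw [ih b c d (by simpa using hb) (by simpa using hc) (by simpa using hd)]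
          refine List.map_congr_left (fun i _ => ?_)
          simp

-- the per-column bodies of the two ports agree on every 4-entry column
theorem pv_column_eq (x y z w : Int) :
    (let t := PySem.Int.bxor (PySem.Int.bxor (PySem.Int.bxor x y) z) w
    [PySem.Int.bxor (PySem.Int.bxor x t) (pvMulTwo (PySem.Int.bxor x y)),
     PySem.Int.bxor (PySem.Int.bxor y t) (pvMulTwo (PySem.Int.bxor y z)),
     PySem.Int.bxor (PySem.Int.bxor z t) (pvMulTwo (PySem.Int.bxor z w)),
     PySem.Int.bxor (PySem.Int.bxor w t) (pvMulTwo (PySem.Int.bxor w x))])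
    = (let c := [x, y, z, w]
       let acc := (pvXorVec c (pvRotate c 1)).map pvMulTwo
       ([1, 2, 3] : List Int).foldl (fun acc n => pvXorVec acc (pvRotate c n)) acc) := by
  have r1 : pvRotate [x, y, z, w] 1 = [y, z, w, x] := rfl
  have r2 : pvRotate [x, y, z, w] 2 = [z, w, x, y] := rfl
  have r3 : pvRotate [x, y, z, w] 3 = [w, x, y, z] := rfl
  simp only [List.foldl_cons, List.foldl_nil, r1, r2, r3, pvXorVec, List.zipWith, List.map]
  simp only [List.cons.injEq, and_true]
  refine ⟨?_, ?_, ?_, ?_⟩ <;>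
    simp only [pv_bxor_assoc, pv_bxor_left_comm, PySem.Int.bxor_comm, pv_bxor_cancel]

-- ===== VERDICT (by name: the statement is the Claim_ definition above) =====
theorem mix_column_values_spec : Claim_equal_mix_column_values := by
  intro state _ hpre
  obtain ⟨h4, hrows⟩ := hpre
  have hh : state.headD [] = PySem.List.pyGetD state 0 [] := by
    rw [PySem.List.pyGetD_zero]; cases state <;> rfl
  have hr : ∀ k : Nat, k < state.length →
      (PySem.List.pyGetD state 0 []).length ≤ (PySem.List.pyGetD state (k : Int) []).length := by
    intro k hk
    rw [← hh, PySem.List.pyGetD_natCast, List.getD_eq_getElem state [] hk]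
    exact hrows _ (List.getElem_mem hk)
  unfold Spec_mix_column_values mix_column_values mix_column_values_alt pvTranspose
  simp only [PySem.List.foldl_append_singleton_eq_map, List.nil_append, List.map_map]
  rw [pvZip4_eq _ _ _ _
    (by simpa using hr 1 (by omega)) (by simpa using hr 2 (by omega)) (by simpa using hr 3 (by omega))]
  simp only [PySem.List.pyRange_zero_nat, List.map_map]
  refine List.map_congr_left (fun k hk => ?_)
  simp only [Function.comp_def]
  have hj : ∀ j : Nat, j < state.length →
      (List.map (fun j : Nat => PySem.List.pyGetD (PySem.List.pyGetD state (↑j) []) (↑k) 0) (List.range state.length)).getD j 0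
      = PySem.List.pyGetD (PySem.List.pyGetD state (↑j) []) (↑k) 0 :=
    fun j hjl => PySem.List.getD_map_range _ _ _ _ hjl
  rw [PySem.List.pyGetD_ofNat' _ 0, PySem.List.pyGetD_ofNat' _ 1,
      PySem.List.pyGetD_ofNat' _ 2, PySem.List.pyGetD_ofNat' _ 3]
  rw [hj 0 (by omega), hj 1 (by omega), hj 2 (by omega), hj 3 (by omega)]
  simp only [Nat.cast_ofNat, Nat.cast_zero, Nat.cast_one, PySem.List.pyGetD_natCast]
  exact pv_column_eq _ _ _ _
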